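-- pv_equiv track=rewrite | github.com/bghira/discord-tron-master | discord_tron_master/classes/resolution.py | group_and_sort_resolutions
-- ===== SOURCE A (Python) =====
-- def group_and_sort_resolutions(resolutions):
--     # Group resolutions into three categories: Square, Landscape, and Portrait
--     grouped_resolutions = {"Square": [], "Landscape": [], "Portrait": []}
--     for r in resolutions:
--         if r["width"] == r["height"]:
--             category = "Square"
--         elif r["width"] > r["height"]:
--             category = "Landscape"
--         else:
--             category = "Portrait"
--         grouped_resolutions[category].append(r)
--
--     # Sort resolution groups by width and height
--     for category, resolutions in grouped_resolutions.items():
--         grouped_resolutions[category] = sorted(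
--             resolutions, key=lambda r: (r["width"], r["height"])
--         )
--
--     return grouped_resolutions
-- ===== SOURCE B (Python) =====
-- def group_and_sort_resolutions(resolutions):
--     # One global stable sort by (width, height), then a single grouping pass:
--     # stability makes each group's order equal to sorting that group alone.
--     result = {"Square": [], "Landscape": [], "Portrait": []}
--     for r in sorted(resolutions, key=lambda r: (r["width"], r["height"])):
--         if r["width"] == r["height"]:
--             result["Square"].append(r)
--         elif r["width"] > r["height"]:
--             result["Landscape"].append(r)
--         else:
--             result["Portrait"].append(r)
--     return result
-- ===== Notes on version B (the rewrite author's own statement) =====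
-- stated objective: alternative
-- what changed: A partitions into three groups and then sorts each group separately; B performs one global stable sort by (width, height) and a single grouping pass, relying on stability to reproduce each group's order.
import Mathlib
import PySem

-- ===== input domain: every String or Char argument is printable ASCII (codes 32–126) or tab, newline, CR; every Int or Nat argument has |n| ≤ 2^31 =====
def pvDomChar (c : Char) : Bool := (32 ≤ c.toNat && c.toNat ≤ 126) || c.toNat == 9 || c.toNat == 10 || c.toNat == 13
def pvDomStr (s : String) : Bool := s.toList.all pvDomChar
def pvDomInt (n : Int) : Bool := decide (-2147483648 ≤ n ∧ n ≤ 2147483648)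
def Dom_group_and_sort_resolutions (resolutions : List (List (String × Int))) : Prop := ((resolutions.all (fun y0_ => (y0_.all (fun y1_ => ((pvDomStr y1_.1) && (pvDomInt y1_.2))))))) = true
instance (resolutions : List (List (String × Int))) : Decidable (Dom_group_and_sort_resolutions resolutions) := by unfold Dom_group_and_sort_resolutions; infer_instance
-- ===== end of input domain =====

-- B replaces A's group-then-sort-each-group by one global stable sort followed by a single grouping
-- pass (same return value; equivalence is about the returned dict).

-- r["width"] / r["height"]: first-match lookup in the association list (Python dict access);
-- Pre_ excludes the KeyError case, so the default 0 is never reached on admitted inputs.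
def pvW (r : List (String × Int)) : Int := (PySem.Dict.mk r).getD "width" 0
def pvH (r : List (String × Int)) : Int := (PySem.Dict.mk r).getD "height" 0

-- ===== PORT A =====
def group_and_sort_resolutions (resolutions : List (List (String × Int))) : List (String × List (List (String × Int))) :=
  let g0 : PySem.Dict String (List (List (String × Int))) :=
    PySem.Dict.ofList [("Square", []), ("Landscape", []), ("Portrait", [])]
  -- for r in resolutions: grouped[category].append(r)
  let g1 := resolutions.foldl (fun g r =>
    let category := if pvW r = pvH r then "Square"
                    else if pvW r > pvH r then "Landscape"
                    else "Portrait"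
    g.modify category [] (fun l => l ++ [r])) g0
  -- for category, resolutions in grouped.items(): grouped[category] = sorted(...)
  let g2 := g1.items.foldl (fun g p => g.insert p.1 (PySem.List.sorted2 p.2 pvW pvH)) g1
  g2.items

-- ===== PORT B =====
def group_and_sort_resolutions_alt (resolutions : List (List (String × Int))) : List (String × List (List (String × Int))) :=
  -- single global stable sort by (width, height)
  let s := PySem.List.sorted2 resolutions pvW pvH
  -- one grouping pass appending into the three result lists
  let acc := s.foldl (fun acc r =>
    if pvW r = pvH r then (acc.1 ++ [r], acc.2.1, acc.2.2)
    else if pvW r > pvH r then (acc.1, acc.2.1 ++ [r], acc.2.2)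
    else (acc.1, acc.2.1, acc.2.2 ++ [r])) (([], [], []) : List (List (String × Int)) × List (List (String × Int)) × List (List (String × Int)))
  [("Square", acc.1), ("Landscape", acc.2.1), ("Portrait", acc.2.2)]

-- ===== PRECONDITION & SPEC =====
-- Pre_ excludes exactly the inputs where Python A raises KeyError: a dict without a "width" or "height" key.
def Pre_group_and_sort_resolutions (resolutions : List (List (String × Int))) : Prop :=
  ∀ r ∈ resolutions, (PySem.Dict.mk r).contains "width" = true ∧ (PySem.Dict.mk r).contains "height" = true
instance (resolutions : List (List (String × Int))) : Decidable (Pre_group_and_sort_resolutions resolutions) := by unfold Pre_group_and_sort_resolutions; infer_instance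
def pvWitness_group_and_sort_resolutions : (List (List (String × Int))) :=
  [[("width", 4), ("height", 3)], [("width", 2), ("height", 2)], [("width", 1), ("height", 3)], [("width", 2), ("height", 1)]]
def Spec_group_and_sort_resolutions (resolutions : List (List (String × Int))) (out : List (String × List (List (String × Int)))) : Prop := out = group_and_sort_resolutions_alt resolutions
instance (resolutions : List (List (String × Int))) (out : List (String × List (List (String × Int)))) : Decidable (Spec_group_and_sort_resolutions resolutions out) := by unfold Spec_group_and_sort_resolutions; infer_instance

-- ===== CLAIM (what is proved, stated in full; the proofs are below) =====
def Claim_equal_group_and_sort_resolutions : Prop := ∀ (resolutions : List (List (String × Int))), Dom_group_and_sort_resolutions resolutions → Pre_group_and_sort_resolutions resolutions → Spec_group_and_sort_resolutions resolutions (group_and_sort_resolutions resolutions)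

-- ===== LEMMAS AND PROOFS =====

-- the Bool lexicographic comparison sorted2 uses
def pvLt {α : Type} (k1 k2 : α → Int) (a b : α) : Bool :=
  decide (k1 a < k1 b) || (!decide (k1 b < k1 a) && decide (k2 a < k2 b))

theorem pvLt_asymm {α : Type} (k1 k2 : α → Int) {a b : α} (h : pvLt k1 k2 a b = true) :
    pvLt k1 k2 b a = false := by
  simp [pvLt] at h ⊢; omega

theorem pvLt_trans_of_not_lt {α : Type} (k1 k2 : α → Int) {x y z : α}
    (h1 : pvLt k1 k2 x y = true) (h2 : pvLt k1 k2 z y = false) : pvLt k1 k2 x z = true := by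
  simp [pvLt] at h1 h2 ⊢; omega

theorem sorted2_eq_foldl {α : Type} (k1 k2 : α → Int) (xs : List α) :
    PySem.List.sorted2 xs k1 k2 =
      xs.foldl (fun acc x => PySem.List.insertBy (pvLt k1 k2) x acc) [] := rfl

theorem insertBy_cons {α : Type} (bf : α → α → Bool) (x y : α) (ys : List α) :
    PySem.List.insertBy bf x (y :: ys) =
      if bf x y then x :: y :: ys else y :: PySem.List.insertBy bf x ys := rfl

theorem insertBy_all_lt {α : Type} (k1 k2 : α → Int) (x : α) (l : List α)
    (h : ∀ z ∈ l, pvLt k1 k2 x z = true) :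
    PySem.List.insertBy (pvLt k1 k2) x l = x :: l := by
  cases l with
  | nil => rfl
  | cons y ys => simp [PySem.List.insertBy, h y (by simp)]

theorem pairwise_insertBy {α : Type} (k1 k2 : α → Int) (x : α) (l : List α)
    (h : l.Pairwise (fun a b => pvLt k1 k2 b a = false)) :
    (PySem.List.insertBy (pvLt k1 k2) x l).Pairwise (fun a b => pvLt k1 k2 b a = false) := by
  induction l with
  | nil => simp [PySem.List.insertBy]
  | cons y ys ih =>
    rcases List.pairwise_cons.mp h with ⟨hy, hys⟩
    by_cases hxy : pvLt k1 k2 x y = true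
    · rw [insertBy_cons, if_pos hxy]
      refine List.pairwise_cons.mpr ⟨?_, h⟩
      intro z hz
      rcases List.mem_cons.mp hz with rfl | hz
      · exact pvLt_asymm k1 k2 hxy
      · exact pvLt_asymm k1 k2 (pvLt_trans_of_not_lt k1 k2 hxy (hy z hz))
    · rw [insertBy_cons, if_neg hxy]
      refine List.pairwise_cons.mpr ⟨?_, ih hys⟩
      intro z hz
      rcases (PySem.List.mem_insertBy _ _ _ _).mp hz with rfl | hz
      · simpa using hxy
      · exact hy z hz

theorem filter_insertBy {α : Type} (k1 k2 : α → Int) (p : α → Bool) (x : α) (l : List α)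
    (h : l.Pairwise (fun a b => pvLt k1 k2 b a = false)) :
    (PySem.List.insertBy (pvLt k1 k2) x l).filter p =
      if p x then PySem.List.insertBy (pvLt k1 k2) x (l.filter p) else l.filter p := by
  induction l with
  | nil => cases hpx : p x <;> simp [PySem.List.insertBy, hpx]
  | cons y ys ih =>
    rcases List.pairwise_cons.mp h with ⟨hy, hys⟩
    by_cases hxy : pvLt k1 k2 x y = true
    · rw [insertBy_cons, if_pos hxy]
      cases hpx : p x with
      | true =>
        cases hpy : p y with
        | true => simp [List.filter_cons, hpx, hpy, insertBy_cons, hxy]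
        | false =>
          have hall : PySem.List.insertBy (pvLt k1 k2) x (ys.filter p) = x :: ys.filter p := by
            apply insertBy_all_lt
            intro z hz
            exact pvLt_trans_of_not_lt k1 k2 hxy (hy z (List.mem_of_mem_filter hz))
          simp [List.filter_cons, hpx, hpy, hall]
      | false => simp [List.filter_cons, hpx]
    · rw [insertBy_cons, if_neg hxy]
      cases hpx : p x with
      | true =>
        cases hpy : p y with
        | true => simp [List.filter_cons, hpx, hpy, insertBy_cons, hxy, ih hys]
        | false => simp [List.filter_cons, hpx, hpy, ih hys]
      | false =>
        cases hpy : p y with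
        | true => simp [List.filter_cons, hpx, hpy, ih hys]
        | false => simp [List.filter_cons, hpx, hpy, ih hys]

theorem sorted2_pairwise' {α : Type} (k1 k2 : α → Int) (xs : List α) :
    (PySem.List.sorted2 xs k1 k2).Pairwise (fun a b => pvLt k1 k2 b a = false) := by
  induction xs using List.reverseRecOn with
  | nil => simp [sorted2_eq_foldl]
  | append_singleton xs x ih =>
    rw [sorted2_eq_foldl] at ih ⊢
    rw [List.foldl_append, List.foldl_cons, List.foldl_nil]
    exact pairwise_insertBy k1 k2 x _ ih

-- a stable sort commutes with filter
theorem filter_sorted2 {α : Type} (k1 k2 : α → Int) (p : α → Bool) (xs : List α) :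
    (PySem.List.sorted2 xs k1 k2).filter p = PySem.List.sorted2 (xs.filter p) k1 k2 := by
  induction xs using List.reverseRecOn with
  | nil => simp [sorted2_eq_foldl]
  | append_singleton xs x ih =>
    rw [sorted2_eq_foldl, List.foldl_append, List.foldl_cons, List.foldl_nil,
      ← sorted2_eq_foldl,
      filter_insertBy k1 k2 p x _ (sorted2_pairwise' k1 k2 xs), List.filter_append]
    cases hpx : p x with
    | true =>
      simp only [List.filter_cons, hpx, List.filter_nil, ite_true]
      rw [ih, sorted2_eq_foldl k1 k2 (xs.filter p ++ [x]), List.foldl_append,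
        List.foldl_cons, List.foldl_nil, ← sorted2_eq_foldl]
    | false =>
      simpa only [List.filter_cons, hpx, Bool.false_eq_true, ite_false, List.filter_nil,
        List.append_nil] using ih

-- B's grouping pass, characterised by three filters
theorem foldl_triple (l : List (List (String × Int)))
    (a b c : List (List (String × Int))) :
    l.foldl (fun acc r =>
        if pvW r = pvH r then (acc.1 ++ [r], acc.2.1, acc.2.2)
        else if pvW r > pvH r then (acc.1, acc.2.1 ++ [r], acc.2.2)
        else (acc.1, acc.2.1, acc.2.2 ++ [r])) (a, b, c) =
      (a ++ l.filter (fun r => decide (pvW r = pvH r)),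
       b ++ l.filter (fun r => !decide (pvW r = pvH r) && decide (pvW r > pvH r)),
       c ++ l.filter (fun r => !decide (pvW r = pvH r) && !decide (pvW r > pvH r))) := by
  induction l generalizing a b c with
  | nil => simp
  | cons r t ih =>
    simp only [List.foldl_cons, List.filter_cons]
    by_cases h1 : pvW r = pvH r
    · rw [if_pos h1, ih]; simp [h1]
    · by_cases h2 : pvW r > pvH r
      · rw [if_neg h1, if_pos h2, ih]; simp [h1, h2]
      · rw [if_neg h1, if_neg h2, ih]; simp [h1, h2]

def pvCat (r : List (String × Int)) : String :=
  if pvW r = pvH r then "Square" else if pvW r > pvH r then "Landscape" else "Portrait"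

theorem pvCat_mem (r : List (String × Int)) : pvCat r ∈ ["Square", "Landscape", "Portrait"] := by
  unfold pvCat; split_ifs <;> simp

-- A's grouping loop builds exactly the dict of the three filters
theorem A_stage1 (resolutions : List (List (String × Int))) :
    resolutions.foldl (fun g r => g.modify (pvCat r) [] (fun l => l ++ [r]))
      (PySem.Dict.ofList [("Square", []), ("Landscape", []), ("Portrait", [])]) =
    PySem.Dict.mk [("Square", resolutions.filter (fun r => pvCat r == "Square")),
                   ("Landscape", resolutions.filter (fun r => pvCat r == "Landscape")),
                   ("Portrait", resolutions.filter (fun r => pvCat r == "Portrait"))] := by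
  apply PySem.Dict.ext
  have hfold : resolutions.foldl (fun g r => g.modify (pvCat r) [] (fun l => l ++ [r]))
      (PySem.Dict.ofList [("Square", []), ("Landscape", []), ("Portrait", [])]) =
      (resolutions.map (fun r => (pvCat r, r))).foldl
        (fun d p => d.modify p.1 [] (fun l => l ++ [p.2]))
        (PySem.Dict.ofList [("Square", []), ("Landscape", []), ("Portrait", [])]) := by
    rw [List.foldl_map]
  set g1 := resolutions.foldl (fun g r => g.modify (pvCat r) [] (fun l => l ++ [r]))
      (PySem.Dict.ofList [("Square", []), ("Landscape", []), ("Portrait", [])]) with hg1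
  have hkeys : g1.keys = ["Square", "Landscape", "Portrait"] := by
    rw [hg1]
    rw [show (fun (g : PySem.Dict String (List (List (String × Int)))) r =>
          g.modify (pvCat r) [] (fun l => l ++ [r])) =
        (fun g r => g.modify (pvCat r) [] ((fun (_ : PySem.Dict String (List (List (String × Int))))
          (_ : List (String × Int)) (l : List (List (String × Int))) => l ++ [r]) g r)) from rfl]
    rw [PySem.Dict.keys_foldl_modify_key]
    have : ∀ r ∈ resolutions.map pvCat,
        r ∈ (PySem.Dict.ofList
          ([("Square", []), ("Landscape", []), ("Portrait", [])] :
            List (String × List (List (String × Int))))).keys := by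
      intro r hr
      rcases List.mem_map.mp hr with ⟨s, _, rfl⟩
      exact pvCat_mem s
    rw [PySem.Set.update_eq_append_filter]
    have hnil : (PySem.Set.ofList (resolutions.map pvCat)).filter
        (fun y => !(PySem.Set.contains (PySem.Dict.ofList
          ([("Square", []), ("Landscape", []), ("Portrait", [])] :
            List (String × List (List (String × Int))))).keys y)) = [] := by
      rw [List.filter_eq_nil_iff]
      intro y hy
      have hmem := (PySem.Set.mem_ofList _ _).mp hy
      have := this y hmem
      simp [PySem.Set.contains_iff, this]
    rw [hnil, List.append_nil]
    decide
  have hget : ∀ c, g1.getD c [] =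
      (PySem.Dict.ofList
        ([("Square", []), ("Landscape", []), ("Portrait", [])] :
          List (String × List (List (String × Int))))).getD c [] ++
      resolutions.filter (fun r => pvCat r == c) := by
    intro c
    rw [hfold, PySem.Dict.getD_foldl_modify_append]
    congr 1
    rw [List.filter_map, List.map_map]
    simp [Function.comp_def]
  have hnd : g1.keys.Nodup := by rw [hkeys]; decide
  rw [PySem.Dict.items_eq_map_keys g1 hnd [], hkeys]
  simp only [List.map_cons, List.map_nil, hget]
  rfl

theorem filter_cat_square (l : List (List (String × Int))) :
    l.filter (fun r => pvCat r == "Square") = l.filter (fun r => decide (pvW r = pvH r)) := by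
  apply List.filter_congr
  intro r _
  unfold pvCat; split_ifs with h1 h2 <;> simp_all

theorem filter_cat_landscape (l : List (List (String × Int))) :
    l.filter (fun r => pvCat r == "Landscape") =
      l.filter (fun r => !decide (pvW r = pvH r) && decide (pvW r > pvH r)) := by
  apply List.filter_congr
  intro r _
  unfold pvCat; split_ifs with h1 h2 <;> simp_all

theorem filter_cat_portrait (l : List (List (String × Int))) :
    l.filter (fun r => pvCat r == "Portrait") =
      l.filter (fun r => !decide (pvW r = pvH r) && !decide (pvW r > pvH r)) := by
  apply List.filter_congr
  intro r _
  unfold pvCat; split_ifs with h1 h2 <;> simp_all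

-- ===== VERDICT (by name: the statement is the Claim_ definition above) =====
theorem group_and_sort_resolutions_spec : Claim_equal_group_and_sort_resolutions := by
  intro resolutions _ _
  unfold Spec_group_and_sort_resolutions group_and_sort_resolutions group_and_sort_resolutions_alt
  simp only []
  rw [show (fun (g : PySem.Dict String (List (List (String × Int)))) (r : List (String × Int)) =>
        g.modify (if pvW r = pvH r then "Square" else if pvW r > pvH r then "Landscape" else "Portrait")
          [] (fun l => l ++ [r])) =
      (fun g r => g.modify (pvCat r) [] (fun l => l ++ [r])) from rfl]
  rw [A_stage1]
  rw [foldl_triple]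
  simp only [List.nil_append]
  rw [filter_cat_square, filter_cat_landscape, filter_cat_portrait]
  rw [filter_sorted2, filter_sorted2, filter_sorted2]
  simp [PySem.Dict.insert, PySem.Dict.contains]
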